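-- pv_equiv track=rewrite | github.com/Ledvin25/Personal | TEC/Tareas/tarea 4_Ledvin_Manuel_Leiva_Mata.py | suma_multiplica_digitos
-- ===== SOURCE A (Python) =====
-- def suma_multiplica_digitos(n):
--
--     if n >= 0:
--
--         x = s = 0 # x digito, s suma
--         m = 1 # m multiplicacion
--
--         while n > 0:
--
--             x = n%10
--
--             m = m * x #multiplicacion
--             s = s + x #suma
--
--             n = n//10
--
--         return s,m
-- ===== SOURCE B (Python) =====
-- def _sum_prod(n):
--     # recursive decomposition: combine the result for n//10 with the last digit
--     if n == 0:
--         return 0, 1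
--     s, m = _sum_prod(n // 10)
--     d = n % 10
--     return s + d, m * d
--
-- def suma_multiplica_digitos(n):
--     if n >= 0:
--         return _sum_prod(n)
-- ===== Notes on version B (the rewrite author's own statement) =====
-- stated objective: alternative
-- what changed: B replaces A's iterative while-loop with two running accumulators by a recursive helper that recurses on n//10 down to 0 and combines the subresult with the last digit on the way back up (digits are aggregated in the opposite order).
-- outside the precondition, e.g. on suma_multiplica_digitos(-3): A returns None, B returns None
import Mathlib
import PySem

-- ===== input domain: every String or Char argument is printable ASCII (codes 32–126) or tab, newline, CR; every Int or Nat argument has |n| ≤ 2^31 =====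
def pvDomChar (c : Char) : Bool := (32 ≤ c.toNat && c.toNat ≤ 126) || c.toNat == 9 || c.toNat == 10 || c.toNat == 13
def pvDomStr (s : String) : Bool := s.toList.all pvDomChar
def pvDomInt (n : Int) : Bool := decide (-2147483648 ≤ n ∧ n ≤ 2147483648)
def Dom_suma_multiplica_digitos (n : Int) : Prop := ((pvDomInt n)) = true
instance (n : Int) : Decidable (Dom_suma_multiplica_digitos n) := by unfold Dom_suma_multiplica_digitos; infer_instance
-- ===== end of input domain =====

-- B replaces A's accumulator while-loop by a recursion on n//10 that combines the
-- subresult with the last digit on the way back up (objective: alternative).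

-- ===== PORT A =====
-- the 'while n > 0' loop of A, with fuel ≥ number of iterations; state (n, s, m)
def pvLoopA (fuel : Nat) (n s m : Int) : Int × Int :=
  match fuel with
  | 0 => (s, m)
  | f + 1 =>
    if n > 0 then
      let x := PySem.Int.mod n 10
      pvLoopA f (PySem.Int.floordiv n 10) (s + x) (m * x)
    else (s, m)

def suma_multiplica_digitos (n : Int) : Int × Int :=
  if n ≥ 0 then pvLoopA n.toNat n 0 1
  else (0, 1)  -- unreachable under Pre_: Python A returns None here

-- ===== PORT B =====
-- B's recursive helper _sum_prod; it is only ever called with n ≥ 0, so it is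
-- ported on Nat (where Python's // and % agree with Nat division/mod).
def pvSumProd (k : Nat) : Int × Int :=
  if k = 0 then (0, 1)
  else
    let p := pvSumProd (k / 10)
    let d : Int := (k % 10 : Nat)
    (p.1 + d, p.2 * d)
decreasing_by exact Nat.div_lt_self (Nat.pos_of_ne_zero (by assumption)) (by omega)

def suma_multiplica_digitos_alt (n : Int) : Int × Int :=
  if n ≥ 0 then pvSumProd n.toNat
  else (0, 1)  -- unreachable under Pre_: Python B returns None here

-- ===== PRECONDITION & SPEC =====
-- Pre_ excludes n < 0, where both Pythons fall through and return None (not an Int pair).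
def Pre_suma_multiplica_digitos (n : Int) : Prop := 0 ≤ n
instance (n : Int) : Decidable (Pre_suma_multiplica_digitos n) := by unfold Pre_suma_multiplica_digitos; infer_instance
def pvWitness_suma_multiplica_digitos : Int := (123)

def Spec_suma_multiplica_digitos (n : Int) (out : Int × Int) : Prop := out = suma_multiplica_digitos_alt n
instance (n : Int) (out : Int × Int) : Decidable (Spec_suma_multiplica_digitos n out) := by unfold Spec_suma_multiplica_digitos; infer_instance

-- ===== CLAIM (what is proved, stated in full; the proofs are below) =====
def Claim_equal_suma_multiplica_digitos : Prop := ∀ (n : Int), Dom_suma_multiplica_digitos n → Pre_suma_multiplica_digitos n → Spec_suma_multiplica_digitos n (suma_multiplica_digitos n)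

-- ===== LEMMAS AND PROOFS =====
-- A's loop run on a natural number k (with enough fuel) adds B's recursive sum to s
-- and multiplies B's recursive product into m.
theorem pvLoopA_eq_sumProd (fuel : Nat) : ∀ (k : Nat), k ≤ fuel → ∀ (s m : Int),
    pvLoopA fuel (k : Int) s m = (s + (pvSumProd k).1, m * (pvSumProd k).2) := by
  induction fuel with
  | zero =>
    intro k hk s m
    interval_cases k
    simp [pvLoopA, pvSumProd]
  | succ f ih =>
    intro k hk s m
    by_cases h0 : k = 0
    · subst h0; simp [pvLoopA, pvSumProd]
    · have hkpos : 0 < k := Nat.pos_of_ne_zero h0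
      have hdiv : k / 10 ≤ f := by
        have := Nat.div_lt_self hkpos (by omega : 1 < 10)
        omega
      have hmod : PySem.Int.mod (k : Int) (10 : Int) = ((k % 10 : Nat) : Int) := by
        exact_mod_cast PySem.Int.mod_natCast k 10
      have hfd : PySem.Int.floordiv (k : Int) (10 : Int) = ((k / 10 : Nat) : Int) := by
        exact_mod_cast PySem.Int.floordiv_natCast k 10
      have hpos : ((k : Int) > 0) := by exact_mod_cast hkpos
      rw [show pvLoopA (f + 1) (k : Int) s m =
            pvLoopA f (PySem.Int.floordiv (k : Int) 10) (s + PySem.Int.mod (k : Int) 10)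
              (m * PySem.Int.mod (k : Int) 10) by rw [pvLoopA, if_pos hpos]]
      rw [hmod, hfd, ih (k / 10) hdiv]
      have hrec : pvSumProd k =
          ((pvSumProd (k / 10)).1 + ((k % 10 : Nat) : Int),
           (pvSumProd (k / 10)).2 * ((k % 10 : Nat) : Int)) := by
        rw [pvSumProd, if_neg h0]
      rw [hrec]
      simp only [Prod.mk.injEq]
      constructor <;> ring

-- ===== VERDICT (by name: the statement is the Claim_ definition above) =====
theorem suma_multiplica_digitos_spec : Claim_equal_suma_multiplica_digitos := by
  intro n _ hpre
  unfold Spec_suma_multiplica_digitos suma_multiplica_digitos suma_multiplica_digitos_alt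
  have h0 : n ≥ 0 := hpre
  rw [if_pos h0, if_pos h0]
  have hcast : (n.toNat : Int) = n := Int.toNat_of_nonneg hpre
  rw [show pvLoopA n.toNat n 0 1 = pvLoopA n.toNat (n.toNat : Int) 0 1 by rw [hcast]]
  rw [pvLoopA_eq_sumProd n.toNat n.toNat le_rfl]
  simp
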